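-- pv_equiv track=rewrite | github.com/HadisAhmadian/DIAFold | scripts/star_alighnment_DIAMOND.py | cigar_to_alignment_fold
-- ===== SOURCE A (Python) =====
-- def cigar_to_alignment_fold(cigar_string, sequence, query) -> str:
--     alignment_s = ""
--     alignment_q = ""
--     index = 0
--     s_curr=0
--     q_curr=0
--     for char in cigar_string:
--         if char.isdigit():
--             index = index * 10 + int(char)
--         else:
--             if char == "M":
--                 alignment_s += sequence[s_curr:s_curr+index]
--                 alignment_q += query[q_curr:q_curr+index]
--                 s_curr=s_curr+index
--                 q_curr=q_curr+index
--                 index=0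
--             elif char == "D":
--                 #alignment_s += sequence[s_curr:s_curr+index]
--                 #alignment_q += "-"*index
--                 s_curr=s_curr+index
--                 index=0
--             elif char == "I":
--                 alignment_q += query[q_curr:q_curr+index]
--                 alignment_s += "-"*index
--                 q_curr=q_curr+index
--                 index=0
--             else:
--                 raise ValueError(f"Invalid character in CIGAR string: {char}")
--     if q_curr<len(query):
--       alignment_q+=query[q_curr:]
--     if len(alignment_s)<len(alignment_q):
--       alignment_s+="-"*(len(alignment_q)-len(alignment_s))
--
--     return alignment_q,alignment_s
-- ===== SOURCE B (Python) =====
-- def cigar_to_alignment_fold(cigar_string, sequence, query):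
--     # pass 1: lex the CIGAR string into (count, op) tokens
--     tokens = []
--     count = 0
--     for ch in cigar_string:
--         if ch.isdigit():
--             count = count * 10 + int(ch)
--         else:
--             if ch not in "MDI":
--                 raise ValueError(f"Invalid character in CIGAR string: {ch}")
--             tokens.append((count, ch))
--             count = 0
--     # pass 2: interpret the tokens, collecting pieces and joining once
--     s_parts, q_parts = [], []
--     s_curr = q_curr = 0
--     for n, op in tokens:
--         if op == "M":
--             s_parts.append(sequence[s_curr:s_curr + n])
--             q_parts.append(query[q_curr:q_curr + n])
--             s_curr += n
--             q_curr += n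
--         elif op == "D":
--             s_curr += n
--         else:  # "I"
--             q_parts.append(query[q_curr:q_curr + n])
--             s_parts.append("-" * n)
--             q_curr += n
--     q_parts.append(query[q_curr:])
--     alignment_q = "".join(q_parts)
--     alignment_s = "".join(s_parts)
--     alignment_s += "-" * max(0, len(alignment_q) - len(alignment_s))
--     return alignment_q, alignment_s
-- ===== Notes on version B (the rewrite author's own statement) =====
-- stated objective: idiomatic
-- what changed: B separates lexing from interpretation: a first pass tokenizes the CIGAR into (count, op) pairs, a second pass interprets the tokens collecting pieces in lists joined once, with unconditional tail-append and max(0,.) padding instead of A's fused single loop with repeated string concatenation and conditional fix-ups.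
import Mathlib
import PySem

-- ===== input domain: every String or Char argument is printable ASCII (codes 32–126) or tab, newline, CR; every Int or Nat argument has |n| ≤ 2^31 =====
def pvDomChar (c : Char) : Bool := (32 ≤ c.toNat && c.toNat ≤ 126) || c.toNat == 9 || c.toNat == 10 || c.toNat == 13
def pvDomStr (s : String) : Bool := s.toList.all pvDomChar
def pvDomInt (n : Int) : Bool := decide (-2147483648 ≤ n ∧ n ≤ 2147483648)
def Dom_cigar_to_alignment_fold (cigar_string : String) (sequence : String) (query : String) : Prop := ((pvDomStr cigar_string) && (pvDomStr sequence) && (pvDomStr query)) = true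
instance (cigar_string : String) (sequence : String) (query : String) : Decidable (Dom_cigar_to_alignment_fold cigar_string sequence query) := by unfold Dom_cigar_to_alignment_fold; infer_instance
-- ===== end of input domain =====

-- B separates lexing (tokens) from interpretation (parts joined once); same return value as A on every valid CIGAR.

-- ===== PORT A =====
-- A's single fused loop over the characters; `none` is exactly where Python raises ValueError
-- (invalid CIGAR character), excluded by Pre_.
def pvA_loop (seq qry : List Char) : List Char → List Char → List Char → Nat → Nat → Nat → Option (List Char × List Char × Nat)
  | [], als, alq, _idx, _s, qc => some (als, alq, qc)
  | c :: rest, als, alq, idx, s, qc =>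
    if c.isDigit then
      pvA_loop seq qry rest als alq (idx * 10 + (c.toNat - 48)) s qc
    else if c = 'M' then
      pvA_loop seq qry rest
        (als ++ PySem.List.slice seq (some (s : Int)) (some ((s : Int) + (idx : Int))))
        (alq ++ PySem.List.slice qry (some (qc : Int)) (some ((qc : Int) + (idx : Int))))
        0 (s + idx) (qc + idx)
    else if c = 'D' then
      pvA_loop seq qry rest als alq 0 (s + idx) qc
    else if c = 'I' then
      pvA_loop seq qry rest
        (als ++ List.replicate idx '-')
        (alq ++ PySem.List.slice qry (some (qc : Int)) (some ((qc : Int) + (idx : Int))))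
        0 s (qc + idx)
    else none

def cigar_to_alignment_fold (cigar_string : String) (sequence : String) (query : String) : String × String :=
  match pvA_loop sequence.toList query.toList cigar_string.toList [] [] 0 0 0 with
  | none => ("", "")   -- Python raises ValueError here (outside Pre_)
  | some (als, alq, qc) =>
    let alq := if qc < query.toList.length then alq ++ PySem.List.slice query.toList (some (qc : Int)) none else alq
    let als := if als.length < alq.length then als ++ List.replicate (alq.length - als.length) '-' else als
    (String.mk alq, String.mk als)

-- ===== PORT B =====
-- pass 1: lex into (count, op) tokens; `none` = Python's ValueError (outside Pre_)
def pvB_tok : List Char → Nat → Option (List (Nat × Char))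
  | [], _count => some []
  | c :: rest, count =>
    if c.isDigit then pvB_tok rest (count * 10 + (c.toNat - 48))
    else if c = 'M' ∨ c = 'D' ∨ c = 'I' then (pvB_tok rest 0).map (fun ts => (count, c) :: ts)
    else none

-- pass 2: interpret the tokens, collecting parts lists
def pvB_interp (seq qry : List Char) : List (Nat × Char) → List (List Char) → List (List Char) → Nat → Nat → (List (List Char) × List (List Char) × Nat)
  | [], sp, qp, _s, qc => (sp, qp, qc)
  | (n, op) :: rest, sp, qp, s, qc =>
    if op = 'M' then
      pvB_interp seq qry rest
        (sp ++ [PySem.List.slice seq (some (s : Int)) (some ((s : Int) + (n : Int)))])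
        (qp ++ [PySem.List.slice qry (some (qc : Int)) (some ((qc : Int) + (n : Int)))])
        (s + n) (qc + n)
    else if op = 'D' then
      pvB_interp seq qry rest sp qp (s + n) qc
    else
      pvB_interp seq qry rest
        (sp ++ [List.replicate n '-'])
        (qp ++ [PySem.List.slice qry (some (qc : Int)) (some ((qc : Int) + (n : Int)))])
        s (qc + n)

def cigar_to_alignment_fold_alt (cigar_string : String) (sequence : String) (query : String) : String × String :=
  match pvB_tok cigar_string.toList 0 with
  | none => ("", "")   -- Python raises ValueError here (outside Pre_)
  | some toks =>
    let r := pvB_interp sequence.toList query.toList toks [] [] 0 0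
    let alq := (r.2.1 ++ [PySem.List.slice query.toList (some (r.2.2 : Int)) none]).flatten
    let als := r.1.flatten
    let als := als ++ List.replicate (alq.length - als.length) '-'   -- "-" * max(0, ...) via Nat subtraction
    (String.mk alq, String.mk als)

-- ===== PRECONDITION & SPEC =====
-- Pre_ excludes exactly the inputs on which A (and B) raise ValueError: a CIGAR character
-- that is neither a digit nor one of M, D, I.
def Pre_cigar_to_alignment_fold (cigar_string : String) (sequence : String) (query : String) : Prop :=
  cigar_string.toList.all (fun c => c.isDigit || c == 'M' || c == 'D' || c == 'I') = true
instance (cigar_string : String) (sequence : String) (query : String) : Decidable (Pre_cigar_to_alignment_fold cigar_string sequence query) := by unfold Pre_cigar_to_alignment_fold; infer_instance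

def pvWitness_cigar_to_alignment_fold : String × String × String := ("2M1D1I", "ACGT", "ACGT")

def Spec_cigar_to_alignment_fold (cigar_string : String) (sequence : String) (query : String) (out : String × String) : Prop := out = cigar_to_alignment_fold_alt cigar_string sequence query
instance (cigar_string : String) (sequence : String) (query : String) (out : String × String) : Decidable (Spec_cigar_to_alignment_fold cigar_string sequence query out) := by unfold Spec_cigar_to_alignment_fold; infer_instance

-- ===== CLAIM (what is proved, stated in full; the proofs are below) =====
def Claim_equal_cigar_to_alignment_fold : Prop := ∀ (cigar_string : String) (sequence : String) (query : String), Dom_cigar_to_alignment_fold cigar_string sequence query → Pre_cigar_to_alignment_fold cigar_string sequence query → Spec_cigar_to_alignment_fold cigar_string sequence query (cigar_to_alignment_fold cigar_string sequence query)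

-- ===== LEMMAS AND PROOFS =====

-- pvB_interp accumulates its parts lists on the left
theorem pvB_interp_acc (seq qry : List Char) (toks : List (Nat × Char)) :
    ∀ (sp qp : List (List Char)) (s qc : Nat),
      pvB_interp seq qry toks sp qp s qc =
        (sp ++ (pvB_interp seq qry toks [] [] s qc).1,
         qp ++ (pvB_interp seq qry toks [] [] s qc).2.1,
         (pvB_interp seq qry toks [] [] s qc).2.2) := by
  induction toks with
  | nil => intro sp qp s qc; simp [pvB_interp]
  | cons t rest ih =>
    intro sp qp s qc
    obtain ⟨n, op⟩ := t
    simp only [pvB_interp, List.nil_append]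
    split_ifs with hM hD
    · rw [ih]
      conv_rhs => rw [ih]
      simp
    · rw [ih]
    · rw [ih]
      conv_rhs => rw [ih]
      simp

-- A's fused loop equals lex-then-interpret, for every loop state
theorem pvA_loop_eq_tok_interp (seq qry : List Char) (chars : List Char) :
    ∀ (als alq : List Char) (idx s qc : Nat),
      pvA_loop seq qry chars als alq idx s qc =
        (pvB_tok chars idx).map (fun toks =>
          (als ++ (pvB_interp seq qry toks [] [] s qc).1.flatten,
           alq ++ (pvB_interp seq qry toks [] [] s qc).2.1.flatten,
           (pvB_interp seq qry toks [] [] s qc).2.2)) := by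
  induction chars with
  | nil => intro als alq idx s qc; simp [pvA_loop, pvB_tok, pvB_interp]
  | cons c rest ih =>
    intro als alq idx s qc
    by_cases hd : c.isDigit
    · simp only [pvA_loop, pvB_tok, if_pos hd]
      exact ih als alq (idx * 10 + (c.toNat - 48)) s qc
    · by_cases hM : c = 'M'
      · subst hM
        simp only [pvA_loop, pvB_tok, if_neg hd]
        norm_num
        rw [ih]
        cases h : pvB_tok rest 0 with
        | none => simp
        | some toks =>
          simp only [Option.map_some, Function.comp_apply]
          rw [show pvB_interp seq qry ((idx, 'M') :: toks) ([] : List (List Char)) ([] : List (List Char)) s qc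
                = pvB_interp seq qry toks
                    [PySem.List.slice seq (some (s : Int)) (some ((s : Int) + (idx : Int)))]
                    [PySem.List.slice qry (some (qc : Int)) (some ((qc : Int) + (idx : Int)))]
                    (s + idx) (qc + idx) from rfl]
          rw [pvB_interp_acc seq qry toks
                [PySem.List.slice seq (some (s : Int)) (some ((s : Int) + (idx : Int)))]
                [PySem.List.slice qry (some (qc : Int)) (some ((qc : Int) + (idx : Int)))]]
          simp
      · by_cases hD : c = 'D'
        · subst hD
          simp only [pvA_loop, pvB_tok, if_neg hd, if_neg hM]
          norm_num
          rw [ih]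
          cases h : pvB_tok rest 0 with
          | none => simp
          | some toks =>
            simp only [Option.map_some, Function.comp_apply]
            rw [show pvB_interp seq qry ((idx, 'D') :: toks) ([] : List (List Char)) ([] : List (List Char)) s qc
                  = pvB_interp seq qry toks [] [] (s + idx) qc from rfl]
        · by_cases hI : c = 'I'
          · subst hI
            simp only [pvA_loop, pvB_tok, if_neg hd, if_neg hM, if_neg hD]
            norm_num
            rw [ih]
            cases h : pvB_tok rest 0 with
            | none => simp
            | some toks =>
              simp only [Option.map_some, Function.comp_apply]
              rw [show pvB_interp seq qry ((idx, 'I') :: toks) ([] : List (List Char)) ([] : List (List Char)) s qc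
                    = pvB_interp seq qry toks
                        [List.replicate idx '-']
                        [PySem.List.slice qry (some (qc : Int)) (some ((qc : Int) + (idx : Int)))]
                        s (qc + idx) from rfl]
              rw [pvB_interp_acc seq qry toks
                    [List.replicate idx '-']
                    [PySem.List.slice qry (some (qc : Int)) (some ((qc : Int) + (idx : Int)))]]
              simp
          · simp [pvA_loop, pvB_tok, hd, hM, hD, hI]

-- ===== VERDICT (by name: the statement is the Claim_ definition above) =====
theorem cigar_to_alignment_fold_spec : Claim_equal_cigar_to_alignment_fold := by
  unfold Claim_equal_cigar_to_alignment_fold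
  intro cig seq qry _hdom _hpre
  unfold Spec_cigar_to_alignment_fold
  unfold cigar_to_alignment_fold cigar_to_alignment_fold_alt
  rw [pvA_loop_eq_tok_interp]
  cases h : pvB_tok cig.toList 0 with
  | none => simp
  | some toks =>
    simp only [Option.map_some, List.nil_append]
    set r := pvB_interp seq.toList qry.toList toks [] [] 0 0 with hr
    -- tail of the query: conditional append (A) = unconditional append of the (possibly empty) slice (B)
    have htail : (if r.2.2 < qry.toList.length then
          (r.2.1.flatten ++ PySem.List.slice qry.toList (some (r.2.2 : Int)) none)
        else r.2.1.flatten)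
        = (r.2.1 ++ [PySem.List.slice qry.toList (some (r.2.2 : Int)) none]).flatten := by
      rw [PySem.List.slice_from_natCast]
      by_cases hq : r.2.2 < qry.toList.length
      · simp [hq]
      · simp [hq, List.drop_eq_nil_of_le (Nat.le_of_not_lt hq)]
    -- padding: conditional pad (A) = pad by Nat subtraction (B)
    have hpad : ∀ (as' aq' : List Char),
        (if as'.length < aq'.length then as' ++ List.replicate (aq'.length - as'.length) '-' else as')
          = as' ++ List.replicate (aq'.length - as'.length) '-' := by
      intro as' aq'
      by_cases hl : as'.length < aq'.length
      · simp [hl]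
      · simp [hl, Nat.sub_eq_zero_of_le (Nat.le_of_not_lt hl)]
    rw [htail, hpad]
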